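-- pv_equiv track=rewrite | github.com/Haksell/codeforces | 1760E.py | f
-- ===== SOURCE A (Python) =====
-- def f(a):
--     o = 0
--     inv = 0
--     for n in a:
--         if n == 0:
--             inv += o
--         else:
--             o += 1
--     return inv
-- ===== SOURCE B (Python) =====
-- def f(a):
--     total = sum(1 for n in a if n == 0)
--     zeros = 0
--     acc = 0
--     for n in a:
--         if n == 0:
--             zeros += 1
--         else:
--             acc += total - zeros
--     return acc
-- ===== Notes on version B (the rewrite author's own statement) =====
-- stated objective: alternative
-- what changed: Counts inversions from the complementary side: a first pass counts all zeros, then a forward pass adds (total_zeros - zeros_seen), i.e. the zeros still ahead, at each one, instead of A's single pass adding the ones seen so far at each zero.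
import Mathlib
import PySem

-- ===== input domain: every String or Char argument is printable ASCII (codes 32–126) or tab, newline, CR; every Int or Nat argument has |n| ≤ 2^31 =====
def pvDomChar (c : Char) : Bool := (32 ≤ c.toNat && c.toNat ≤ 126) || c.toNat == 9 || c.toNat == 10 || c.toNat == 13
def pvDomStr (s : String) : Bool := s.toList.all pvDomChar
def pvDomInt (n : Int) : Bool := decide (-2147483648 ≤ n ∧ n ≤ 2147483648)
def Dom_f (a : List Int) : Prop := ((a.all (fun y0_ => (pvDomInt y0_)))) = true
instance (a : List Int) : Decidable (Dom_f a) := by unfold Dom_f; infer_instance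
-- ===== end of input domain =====

-- B counts the same 0/1 inversions from the complementary side (zeros remaining after each 1);
-- objective: alternative decomposition, same O(n) cost.

-- ===== PORT A =====
-- state (o, inv): o = ones seen so far, inv = accumulator
def f (a : List Int) : Int :=
  (a.foldl (fun (s : Int × Int) n => if n = 0 then (s.1, s.2 + s.1) else (s.1 + 1, s.2)) (0, 0)).2

-- ===== PORT B =====
-- first pass: total = number of zeros (Python: sum(1 for n in a if n == 0))
def fAltTotal (a : List Int) : Int :=
  a.foldl (fun c n => if n = 0 then c + 1 else c) 0

-- second pass, state (zeros, acc)
def f_alt (a : List Int) : Int :=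
  let total := fAltTotal a
  (a.foldl (fun (s : Int × Int) n => if n = 0 then (s.1 + 1, s.2) else (s.1, s.2 + (total - s.1))) (0, 0)).2

-- ===== PRECONDITION & SPEC =====
def Spec_f (a : List Int) (out : Int) : Prop := out = f_alt a
instance (a : List Int) (out : Int) : Decidable (Spec_f a out) := by unfold Spec_f; infer_instance

-- ===== CLAIM (what is proved, stated in full; the proofs are below) =====
def Claim_equal_f : Prop := ∀ (a : List Int), Dom_f a → Spec_f a (f a)

-- ===== LEMMAS AND PROOFS =====

-- number of ones (non-zeros), as an Int
def pvOnes : List Int → Int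
  | [] => 0
  | n :: t => (if n = 0 then 0 else 1) + pvOnes t

-- number of zeros, as an Int
def pvZeros : List Int → Int
  | [] => 0
  | n :: t => (if n = 0 then 1 else 0) + pvZeros t

-- canonical inversion count: for each 1, the zeros after it
def pvInv : List Int → Int
  | [] => 0
  | n :: t => (if n = 0 then 0 else pvZeros t) + pvInv t

theorem fAltTotal_from (a : List Int) : ∀ c : Int,
    a.foldl (fun c n => if n = 0 then c + 1 else c) c = c + pvZeros a := by
  induction a with
  | nil => intro c; simp [pvZeros]
  | cons n t ih =>
    intro c
    simp only [List.foldl, pvZeros]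
    rw [ih]
    split <;> ring

theorem foldA_from (a : List Int) : ∀ o inv : Int,
    (a.foldl (fun (s : Int × Int) n => if n = 0 then (s.1, s.2 + s.1) else (s.1 + 1, s.2)) (o, inv)).2
      = inv + o * pvZeros a + pvInv a := by
  induction a with
  | nil => intro o inv; simp [pvZeros, pvInv]
  | cons n t ih =>
    intro o inv
    simp only [List.foldl]
    by_cases h : n = 0
    · simp only [h, ite_true, pvZeros, pvInv]
      rw [ih]; ring
    · simp only [if_neg h, pvZeros, pvInv]
      rw [ih]; ring

theorem foldB_from (total : Int) (a : List Int) : ∀ z acc : Int,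
    (a.foldl (fun (s : Int × Int) n => if n = 0 then (s.1 + 1, s.2) else (s.1, s.2 + (total - s.1))) (z, acc)).2
      = acc + pvInv a + pvOnes a * (total - z - pvZeros a) := by
  induction a with
  | nil => intro z acc; simp [pvInv, pvOnes, pvZeros]
  | cons n t ih =>
    intro z acc
    simp only [List.foldl]
    by_cases h : n = 0
    · simp only [h, ite_true, pvInv, pvOnes, pvZeros]
      rw [ih]; ring
    · simp only [if_neg h, pvInv, pvOnes, pvZeros]
      rw [ih]; ring

theorem f_eq_inv (a : List Int) : f a = pvInv a := by
  unfold f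
  rw [foldA_from]
  ring

theorem f_alt_eq_inv (a : List Int) : f_alt a = pvInv a := by
  unfold f_alt fAltTotal
  rw [foldB_from, fAltTotal_from]
  ring

-- ===== VERDICT (by name: the statement is the Claim_ definition above) =====
theorem f_spec : Claim_equal_f := by
  intro a _
  unfold Spec_f
  rw [f_eq_inv, f_alt_eq_inv]
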